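-- pv_equiv track=rewrite | github.com/corei8/ordotools | ordo_tools/liturgical_dates.py | epact_build
-- ===== SOURCE A (Python) =====
-- def epact_build(adjust=int) -> list:
--     build_base, day, x = [], 1, 0
--     while x != 19:
--         day += 11*(x if x == 0 else 1)
--         if day > 30:
--             day -= 30
--         build_base.append(day)
--         x += 1
--     build = []
--     for y in build_base:
--         y += adjust
--         if y > 31:
--             y -= 31
--         elif y <= 0:
--             y += 31
--         build.append(y)
--     return build
-- ===== SOURCE B (Python) =====
-- def epact_build(adjust=int) -> list:
--     build = []
--     for x in range(19):
--         y = (11 * x) % 30 + 1 + adjust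
--         if y > 31:
--             y -= 31
--         elif y <= 0:
--             y += 31
--         build.append(y)
--     return build
-- ===== Notes on version B (the rewrite author's own statement) =====
-- stated objective: simpler
-- what changed: Replaced the while-loop that accumulates day += 11 with a >30 wrap and the separate adjustment pass by a single loop over range(19) computing each epact directly as (11*x) % 30 + 1 plus the adjust wrap, with no intermediate base list.
import Mathlib
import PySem

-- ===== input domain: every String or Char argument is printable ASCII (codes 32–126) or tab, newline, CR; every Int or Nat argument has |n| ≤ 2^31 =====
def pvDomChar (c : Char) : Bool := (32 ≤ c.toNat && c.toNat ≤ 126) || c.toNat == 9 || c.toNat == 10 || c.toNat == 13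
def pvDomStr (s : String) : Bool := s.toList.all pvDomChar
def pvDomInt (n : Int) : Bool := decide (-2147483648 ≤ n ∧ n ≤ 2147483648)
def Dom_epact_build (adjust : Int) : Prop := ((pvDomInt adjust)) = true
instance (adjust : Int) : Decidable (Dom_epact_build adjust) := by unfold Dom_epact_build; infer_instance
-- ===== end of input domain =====

-- B replaces A's two passes (accumulate day+=11 with >30 wrap, then adjust) by one loop using the closed form (11*x)%30+1; objective: simpler.

-- ===== PORT A =====
def epact_build (adjust : Int) : List Int :=
  -- while x != 19 loop, ported as a fold over the 19 iteration indices with state (build_base, day)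
  let base :=
    ((PySem.List.pyRange 0 19 1).foldl (fun (s : List Int × Int) x =>
      let day := s.2 + 11 * (if x == 0 then x else 1)
      let day := if day > 30 then day - 30 else day
      (s.1 ++ [day], day)) ([], 1)).1
  base.foldl (fun build y =>
    let y := y + adjust
    let y := if y > 31 then y - 31 else if y ≤ 0 then y + 31 else y
    build ++ [y]) []

-- ===== PORT B =====
def epact_build_alt (adjust : Int) : List Int :=
  (PySem.List.pyRange 0 19 1).foldl (fun build x =>
    let y := PySem.Int.mod (11 * x) 30 + 1 + adjust
    let y := if y > 31 then y - 31 else if y ≤ 0 then y + 31 else y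
    build ++ [y]) []

-- ===== PRECONDITION & SPEC =====
def Spec_epact_build (adjust : Int) (out : List Int) : Prop := out = epact_build_alt adjust
instance (adjust : Int) (out : List Int) : Decidable (Spec_epact_build adjust out) := by unfold Spec_epact_build; infer_instance

-- ===== CLAIM (what is proved, stated in full; the proofs are below) =====
def Claim_equal_epact_build : Prop := ∀ (adjust : Int), Dom_epact_build adjust → Spec_epact_build adjust (epact_build adjust)

-- ===== LEMMAS AND PROOFS =====

-- ===== VERDICT (by name: the statement is the Claim_ definition above) =====
theorem epact_build_spec : Claim_equal_epact_build := by
  intro adjust _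
  show epact_build adjust = epact_build_alt adjust
  simp [epact_build, epact_build_alt, PySem.List.pyRange, PySem.Int.mod, List.range_succ]
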